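-- pv_equiv track=rewrite | github.com/sust-cs-uob/eam-core | src/eam_core/validate_model.py | get_validated_statuses
-- ===== SOURCE A (Python) =====
-- statuses = ['development', 'testing', 'live', 'archived', 'test_resource']
--
-- def get_validated_statuses(level):
--     validated_statuses = []
--     level_reached = False
--     for status in statuses:
--         if status == level:
--             level_reached = True
--
--         if level_reached:
--             validated_statuses.append(status)
--
--     return validated_statuses
-- ===== SOURCE B (Python) =====
-- statuses = ['development', 'testing', 'live', 'archived', 'test_resource']
--
-- def get_validated_statuses(level):
--     if level in statuses:
--         return statuses[statuses.index(level):]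
--     return []
-- ===== Notes on version B (the rewrite author's own statement) =====
-- stated objective: simpler
-- what changed: Replaced the flag-and-accumulator scan with a membership test followed by index-and-slice, removing the explicit loop.
import Mathlib
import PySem

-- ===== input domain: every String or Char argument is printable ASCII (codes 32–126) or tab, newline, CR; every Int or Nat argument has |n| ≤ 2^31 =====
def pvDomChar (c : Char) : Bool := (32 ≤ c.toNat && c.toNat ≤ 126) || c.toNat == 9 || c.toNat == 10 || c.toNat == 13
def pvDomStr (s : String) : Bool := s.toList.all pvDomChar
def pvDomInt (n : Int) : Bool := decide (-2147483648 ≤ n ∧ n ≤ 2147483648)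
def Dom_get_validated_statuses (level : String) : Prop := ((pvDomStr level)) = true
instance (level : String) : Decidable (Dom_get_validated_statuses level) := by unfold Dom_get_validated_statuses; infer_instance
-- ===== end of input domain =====

-- B replaces A's flag-and-accumulator scan by a membership test and an index-then-slice; objective: simpler.


-- module-level constant 'statuses'
def pvStatuses : List String := ["development", "testing", "live", "archived", "test_resource"]

-- ===== PORT A =====
-- for status in statuses: if status == level: level_reached = True; if level_reached: append
def get_validated_statuses (level : String) : List String :=
  (pvStatuses.foldl
    (fun (st : List String × Bool) status =>
      let reached := if status == level then true else st.2
      (if reached then st.1 ++ [status] else st.1, reached))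
    ([], false)).1

-- ===== PORT B =====
-- if level in statuses: return statuses[statuses.index(level):]; return []
def get_validated_statuses_alt (level : String) : List String :=
  if pvStatuses.contains level then
    match PySem.List.index? pvStatuses level with
    | some i => PySem.List.slice pvStatuses (some i) none
    | none => []
  else []

-- ===== PRECONDITION & SPEC =====
def Spec_get_validated_statuses (level : String) (out : List String) : Prop := out = get_validated_statuses_alt level
instance (level : String) (out : List String) : Decidable (Spec_get_validated_statuses level out) := by unfold Spec_get_validated_statuses; infer_instance

-- ===== CLAIM (what is proved, stated in full; the proofs are below) =====
def Claim_equal_get_validated_statuses : Prop := ∀ (level : String), Dom_get_validated_statuses level → Spec_get_validated_statuses level (get_validated_statuses level)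

-- ===== LEMMAS AND PROOFS =====

-- Both programs' results depend only on which (if any) of the five fixed statuses equals `level`.
theorem gvs_case (level : String) :
    Spec_get_validated_statuses level (get_validated_statuses level) := by
  unfold Spec_get_validated_statuses
  by_cases h1 : level = "development"
  · subst h1; decide
  by_cases h2 : level = "testing"
  · subst h2; decide
  by_cases h3 : level = "live"
  · subst h3; decide
  by_cases h4 : level = "archived"
  · subst h4; decide
  by_cases h5 : level = "test_resource"
  · subst h5; decide
  simp [get_validated_statuses, get_validated_statuses_alt, pvStatuses,
    Ne.symm h1, Ne.symm h2, Ne.symm h3, Ne.symm h4, Ne.symm h5, h1, h2, h3, h4, h5]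

-- ===== VERDICT (by name: the statement is the Claim_ definition above) =====
theorem get_validated_statuses_spec : Claim_equal_get_validated_statuses := by
  intro level _
  exact gvs_case level
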